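-- pv_equiv track=rewrite | github.com/Exa-Networks/exabgp | lab/benchmark_update_size.py | progressive_approach
-- ===== SOURCE A (Python) =====
-- def progressive_approach(n_nlris: int, nlri_size: int = 23) -> int:
--     """Simulates proposed approach: track size as int."""
--     msg_size = 4000
--     announced = b''
--     withdraws = b''
--     announced_size = 0
--     withdraws_size = 0
--     yields = 0
--
--     for _ in range(n_nlris):
--         packed = b'x' * nlri_size
--         packed_size = len(packed)
--         if announced_size + withdraws_size + packed_size <= msg_size:
--             announced += packed
--             announced_size += packed_size
--         else:
--             yields += 1
--             announced = packed
--             announced_size = packed_size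
--             withdraws = b''
--             withdraws_size = 0
--
--     return yields
-- ===== SOURCE B (Python) =====
-- def progressive_approach(n_nlris: int, nlri_size: int = 23) -> int:
--     """Closed form: items of size s pack 4000//s per buffer; yields = (n-1)//per."""
--     if n_nlris <= 0:
--         return 0
--     size = max(0, nlri_size)   # b'x' * negative is empty in Python
--     if size == 0:
--         return 0               # zero-size items never overflow
--     if size > 4000:
--         return n_nlris         # every item overflows the buffer
--     per = 4000 // size
--     return (n_nlris - 1) // per
-- ===== Notes on version B (the rewrite author's own statement) =====
-- stated objective: faster
-- what changed: Replaced the O(n) simulation loop (building byte strings item by item and resetting the buffer on overflow) with an O(1) closed form: per = 4000 // nlri_size items fit per buffer, so yields = (n_nlris - 1) // per, with direct answers for nonpositive counts, zero-size items and items larger than the buffer.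
import Mathlib
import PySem

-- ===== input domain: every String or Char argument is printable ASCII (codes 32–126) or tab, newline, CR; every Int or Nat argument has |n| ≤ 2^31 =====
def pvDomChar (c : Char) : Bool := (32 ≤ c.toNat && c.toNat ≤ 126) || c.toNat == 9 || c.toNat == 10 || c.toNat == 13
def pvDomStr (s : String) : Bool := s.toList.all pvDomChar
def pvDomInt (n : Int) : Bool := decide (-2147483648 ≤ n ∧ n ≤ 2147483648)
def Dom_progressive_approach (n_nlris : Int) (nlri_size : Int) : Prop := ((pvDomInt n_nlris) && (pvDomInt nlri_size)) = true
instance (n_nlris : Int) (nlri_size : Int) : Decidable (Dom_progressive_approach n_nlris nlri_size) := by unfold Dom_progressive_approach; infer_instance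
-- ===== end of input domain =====

-- B replaces A's O(n) buffer-filling simulation by an O(1) closed form (yields = (n-1) // (4000 // size)).

-- ===== PORT A =====
-- loop body of A (bytes modelled as List Char; b'x' * k with k < 0 is empty, as in Python)
def paStep (nlri_size : Int) (st : List Char × List Char × Int × Int × Int) :
    List Char × List Char × Int × Int × Int :=
  let packed := List.replicate nlri_size.toNat 'x'
  let packed_size : Int := (packed.length : Int)
  match st with
  | (announced, withdraws, announced_size, withdraws_size, yields) =>
    if announced_size + withdraws_size + packed_size ≤ 4000 then
      (announced ++ packed, withdraws, announced_size + packed_size, withdraws_size, yields)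
    else
      (packed, [], packed_size, 0, yields + 1)

def progressive_approach (n_nlris : Int) (nlri_size : Int) : Int :=
  ((PySem.List.pyRange 0 n_nlris 1).foldl (fun st _ => paStep nlri_size st)
    ([], [], 0, 0, 0)).2.2.2.2

-- ===== PORT B =====
def progressive_approach_alt (n_nlris : Int) (nlri_size : Int) : Int :=
  if n_nlris ≤ 0 then 0
  else
    let size := max 0 nlri_size
    if size = 0 then 0
    else if 4000 < size then n_nlris
    else PySem.Int.floordiv (n_nlris - 1) (PySem.Int.floordiv 4000 size)

-- ===== PRECONDITION & SPEC =====
def Spec_progressive_approach (n_nlris : Int) (nlri_size : Int) (out : Int) : Prop := out = progressive_approach_alt n_nlris nlri_size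
instance (n_nlris : Int) (nlri_size : Int) (out : Int) : Decidable (Spec_progressive_approach n_nlris nlri_size out) := by unfold Spec_progressive_approach; infer_instance

-- ===== CLAIM (what is proved, stated in full; the proofs are below) =====
def Claim_equal_progressive_approach : Prop := ∀ (n_nlris : Int) (nlri_size : Int), Dom_progressive_approach n_nlris nlri_size → Spec_progressive_approach n_nlris nlri_size (progressive_approach n_nlris nlri_size)

-- ===== LEMMAS AND PROOFS =====

lemma paStep_foldl (s : Int) (st : List Char × List Char × Int × Int × Int) (l : List Int) :
    l.foldl (fun st _ => paStep s st) st = (paStep s)^[l.length] st := by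
  induction l generalizing st with
  | nil => rfl
  | cons x l ih => simp [List.foldl, ih, Function.iterate_succ_apply]

-- zero-size items: the loop state never changes
lemma paStep_zero (s : Int) (hs : s.toNat = 0) :
    paStep s ([], [], 0, 0, 0) = ([], [], 0, 0, 0) := by
  simp [paStep, hs]

-- oversized items: every iteration yields
lemma paStep_big (s : Int) (hs : 4000 < (s.toNat : Int)) (m : Nat) :
    (paStep s)^[m + 1] ([], [], 0, 0, 0) =
      (List.replicate s.toNat 'x', [], (s.toNat : Int), 0, (m : Int) + 1) := by
  induction m with
  | zero => simp [paStep]; omega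
  | succ m ih =>
      rw [Function.iterate_succ_apply', ih]
      simp only [paStep, List.length_replicate]
      rw [if_neg (by push_cast at hs ⊢; omega)]
      have hcast : ((m : Int) + 1) + 1 = ((m + 1 : Nat) : Int) + 1 := by push_cast; ring
      rw [hcast]

-- main invariant for 1 ≤ size ≤ 4000, with k = 4000 / size items per buffer:
-- after m+1 iterations announced_size = size * (m % k + 1), withdraws_size = 0, yields = m / k
lemma paStep_main (s : Int) (s' : Nat) (hs' : s' = s.toNat) (h1 : 1 ≤ s') (h4 : s' ≤ 4000) (m : Nat) :
    ((paStep s)^[m + 1] ([], [], 0, 0, 0)).2.2.1 = (s' : Int) * ((m % (4000 / s') : Nat) + 1) ∧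
    ((paStep s)^[m + 1] ([], [], 0, 0, 0)).2.2.2.1 = 0 ∧
    ((paStep s)^[m + 1] ([], [], 0, 0, 0)).2.2.2.2 = ((m / (4000 / s') : Nat) : Int) := by
  set k := 4000 / s' with hk
  have hk1 : 1 ≤ k := by
    rw [hk]; exact (Nat.one_le_div_iff (by omega)).mpr h4
  induction m with
  | zero =>
      rw [Function.iterate_one]
      simp only [paStep, List.length_replicate, ← hs']
      rw [if_pos (by push_cast; omega)]
      refine ⟨by simp, rfl, by simp⟩
  | succ m ih =>
      rw [Function.iterate_succ_apply']
      obtain ⟨ha, hw, hy⟩ := ih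
      set st := (paStep s)^[m + 1] ([], [], 0, 0, 0) with hst
      obtain ⟨an, wd, a, w, y⟩ := st
      simp only at ha hw hy
      subst ha hw hy
      set j := m % k with hj
      set q := m / k with hq
      have hjk : j < k := Nat.mod_lt _ (by omega)
      have hm : k * q + j = m := Nat.div_add_mod m k
      -- the guard of A's if, as a Nat statement about k = items per buffer
      have hnat : (s' * (j + 2) ≤ 4000) ↔ j + 2 ≤ k := by
        rw [hk, Nat.le_div_iff_mul_le (show 0 < s' by omega), Nat.mul_comm]
      have hguard : ((s' : Int) * ((j : Int) + 1) + 0 + (s' : Int) ≤ 4000) ↔ j + 2 ≤ k := by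
        rw [← hnat]
        constructor
        · intro h
          have : ((s' * (j + 2) : Nat) : Int) ≤ 4000 := by push_cast; nlinarith
          exact_mod_cast this
        · intro h
          have : ((s' * (j + 2) : Nat) : Int) ≤ 4000 := by exact_mod_cast h
          push_cast at this; nlinarith
      by_cases hc : j + 2 ≤ k
      · -- the item fits: (m+1) % k = j + 1, (m+1) / k = q
        have hm1 : m + 1 = k * q + (j + 1) := by omega
        have hmod : (m + 1) % k = j + 1 := by
          rw [hm1, Nat.mul_add_mod, Nat.mod_eq_of_lt (by omega)]
        have hdiv : (m + 1) / k = q := by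
          rw [hm1, Nat.mul_add_div (by omega), Nat.div_eq_of_lt (by omega), Nat.add_zero]
        simp only [paStep, List.length_replicate, ← hs']
        rw [if_pos (hguard.mpr hc)]
        refine ⟨?_, rfl, ?_⟩
        · simp only [hmod]; push_cast; ring
        · simp only [hdiv]
      · -- overflow: j = k - 1, so (m+1) % k = 0, (m+1) / k = q + 1
        have hm1 : m + 1 = k * (q + 1) := by rw [Nat.mul_add, Nat.mul_one]; omega
        have hmod : (m + 1) % k = 0 := by rw [hm1, Nat.mul_mod_right]
        have hdiv : (m + 1) / k = q + 1 := by rw [hm1, Nat.mul_div_cancel_left _ (by omega)]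
        simp only [paStep, List.length_replicate, ← hs']
        rw [if_neg (fun h => hc (hguard.mp h))]
        refine ⟨?_, rfl, ?_⟩
        · simp only [hmod]; push_cast; ring
        · simp only [hdiv]; push_cast; ring

-- ===== VERDICT (by name: the statement is the Claim_ definition above) =====
theorem progressive_approach_spec : Claim_equal_progressive_approach := by
  intro n s _
  unfold Spec_progressive_approach progressive_approach progressive_approach_alt
  by_cases hn : n ≤ 0
  · rw [PySem.List.pyRange_one_eq_nil hn]
    simp [hn]
  · push_neg at hn
    rw [if_neg (by omega)]
    have hlen : (PySem.List.pyRange 0 n 1).length = n.toNat := by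
      rw [PySem.List.length_pyRange_one]; omega
    rw [paStep_foldl, hlen]
    have hmax : max 0 s = (s.toNat : Int) := by omega
    rw [hmax]
    set s' := s.toNat with hs'
    have hm1 : ∃ m : Nat, n.toNat = m + 1 := ⟨n.toNat - 1, by omega⟩
    obtain ⟨m, hm⟩ := hm1
    by_cases h0 : s' = 0
    · rw [if_pos (by exact_mod_cast congrArg (Nat.cast : Nat → Int) h0)]
      have : (paStep s)^[n.toNat] ([], [], 0, 0, 0) = ([], [], 0, 0, 0) :=
        Function.iterate_fixed (paStep_zero s h0) _
      rw [this]
    · rw [if_neg (by exact_mod_cast h0)]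
      by_cases hbig : 4000 < (s' : Int)
      · rw [if_pos hbig, hm, paStep_big s hbig]
        simp; omega
      · rw [if_neg hbig]
        have h4 : s' ≤ 4000 := by exact_mod_cast not_lt.mp hbig
        have := (paStep_main s s' rfl (by omega) h4 m).2.2
        rw [hm, this]
        have h4000 : (4000 : Int) = ((4000 : Nat) : Int) := by norm_num
        rw [h4000, PySem.Int.floordiv_natCast]
        have hn1 : n - 1 = ((m : Nat) : Int) := by omega
        rw [hn1, PySem.Int.floordiv_natCast]
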